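-- pv_equiv track=rewrite | github.com/Pandalism/Bootcamp-excersises | 01_exercise/more_numpy.py | simplify_list
-- ===== SOURCE A (Python) =====
-- def simplify_list(input_list):
--     """
--     Function that coaleses both positive and negative numbers together
--     """
--     # check if current sign is positive
--     crrnt_sign_plus = (input_list[0] > 0)
--     # make empty vars
--     output_list = []
--     temp_var = 0
--     # loop through list
--     for enumer_i in input_list:
--         # check if sign change
--         if (enumer_i > 0) ^ crrnt_sign_plus:
--             output_list.append(temp_var)
--             temp_var = enumer_i
--             crrnt_sign_plus = (enumer_i > 0)
--         else:
--             temp_var += enumer_i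
--     output_list.append(temp_var)
--     return output_list
-- ===== SOURCE B (Python) =====
-- def simplify_list(input_list):
--     # Recursive run-splitting: peel off the maximal leading same-sign run,
--     # emit its sum, and recurse on the remainder.
--     if not input_list:
--         return []
--     key = input_list[0] > 0
--     i = 1
--     while i < len(input_list) and (input_list[i] > 0) == key:
--         i += 1
--     return [sum(input_list[:i])] + simplify_list(input_list[i:])
-- ===== Notes on version B (the rewrite author's own statement) =====
-- stated objective: alternative
-- what changed: Replaces A's single-pass sign-flag/temp-var state machine with a recursive run-splitting decomposition: peel off the maximal leading same-sign run, emit sum(run), recurse on the rest.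
import Mathlib
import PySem

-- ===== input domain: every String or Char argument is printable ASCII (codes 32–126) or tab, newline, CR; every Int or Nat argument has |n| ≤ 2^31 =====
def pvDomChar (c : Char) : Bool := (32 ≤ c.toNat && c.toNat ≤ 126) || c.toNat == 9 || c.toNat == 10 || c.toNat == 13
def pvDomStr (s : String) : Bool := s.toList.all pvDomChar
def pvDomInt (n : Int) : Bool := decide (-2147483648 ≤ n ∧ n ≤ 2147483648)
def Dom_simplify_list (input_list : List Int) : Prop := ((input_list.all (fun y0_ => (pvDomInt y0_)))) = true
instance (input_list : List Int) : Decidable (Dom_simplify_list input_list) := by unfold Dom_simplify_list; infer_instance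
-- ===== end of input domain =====

-- B replaces A's sign-flag/temp-var state machine by a recursive run-splitting
-- decomposition (objective: alternative, same task different structure).
-- A raises IndexError on []; Pre_ excludes it (B returns [] there).


-- ===== PORT A =====
-- loop body of A: state = (output_list, temp_var, crrnt_sign_plus)
def stepA (s : List Int × Int × Bool) (x : Int) : List Int × Int × Bool :=
  if (decide (x > 0)) != s.2.2 then (s.1 ++ [s.2.1], x, decide (x > 0))
  else (s.1, s.2.1 + x, s.2.2)

def simplify_list (input_list : List Int) : List Int :=
  match PySem.List.pyGet? input_list 0 with
  | none => []  -- IndexError in Python; excluded by Pre_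
  | some h0 =>
    let st := input_list.foldl stepA ([], 0, decide (h0 > 0))
    st.1 ++ [st.2.1]

-- ===== PORT B =====
-- B: if empty return []; take the maximal leading run of elements whose (x > 0)
-- matches the first element's, emit its sum, recurse on the remainder.
-- Python's index-advancing while + slices is ported as takeWhile/dropWhile (exact here).
def simplify_list_alt (input_list : List Int) : List Int :=
  match input_list with
  | [] => []
  | h :: t =>
    let key := decide (h > 0)
    ((h :: t.takeWhile (fun x => decide (x > 0) == key)).foldl (· + ·) 0)
      :: simplify_list_alt (t.dropWhile (fun x => decide (x > 0) == key))
termination_by input_list.length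
decreasing_by
  exact Nat.lt_succ_of_le (List.length_dropWhile_le _ _)

-- ===== PRECONDITION & SPEC =====
-- A raises IndexError on the empty list (it evaluates input_list[0]); excluded.
def Pre_simplify_list (input_list : List Int) : Prop := input_list ≠ []
instance (input_list : List Int) : Decidable (Pre_simplify_list input_list) := by unfold Pre_simplify_list; infer_instance
def pvWitness_simplify_list : List Int := [1, 2, -3, -4, 5]

def Spec_simplify_list (input_list : List Int) (out : List Int) : Prop := out = simplify_list_alt input_list
instance (input_list : List Int) (out : List Int) : Decidable (Spec_simplify_list input_list out) := by unfold Spec_simplify_list; infer_instance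

-- ===== CLAIM (what is proved, stated in full; the proofs are below) =====
def Claim_equal_simplify_list : Prop := ∀ (input_list : List Int), Dom_simplify_list input_list → Pre_simplify_list input_list → Spec_simplify_list input_list (simplify_list input_list)

-- ===== LEMMAS AND PROOFS =====

-- A's loop with pending accumulator tv and flag s produces the run sums of B's
-- run-splitting, with the pending run summed starting from tv.
lemma loop_runs (t : List Int) : ∀ (o : List Int) (tv : Int) (s : Bool),
    (t.foldl stepA (o, tv, s)).1 ++ [(t.foldl stepA (o, tv, s)).2.1] =
      o ++ ((t.takeWhile (fun x => decide (x > 0) == s)).foldl (· + ·) tv)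
        :: simplify_list_alt (t.dropWhile (fun x => decide (x > 0) == s)) := by
  induction t with
  | nil => intro o tv s; simp [simplify_list_alt]
  | cons x t ih =>
    intro o tv s
    by_cases h : decide (x > 0) = s
    · have hA : stepA (o, tv, s) x = (o, tv + x, s) := by simp [stepA, h]
      simp only [List.foldl, hA, List.takeWhile, List.dropWhile, h, beq_self_eq_true,
        ih o (tv + x) s, List.foldl_cons]
    · have hA : stepA (o, tv, s) x = (o ++ [tv], x, decide (x > 0)) := by
        simp [stepA, h]
      have hb : ((fun x => decide (x > 0) == s) x) = false := by simp [h]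
      simp only [List.foldl, hA, List.takeWhile, List.dropWhile, hb,
        ih (o ++ [tv]) x (decide (x > 0))]
      simp only [List.append_assoc, List.cons_append, List.nil_append]
      congr 1
      rw [simplify_list_alt]
      simp

-- ===== VERDICT (by name: the statement is the Claim_ definition above) =====
theorem simplify_list_spec : Claim_equal_simplify_list := by
  intro input_list _ hpre
  match input_list with
  | [] => exact absurd rfl hpre
  | h :: t =>
    show simplify_list (h :: t) = simplify_list_alt (h :: t)
    have h0 : PySem.List.pyGet? (h :: t) 0 = some h := by
      simp [PySem.List.pyGet?, PySem.List.pyIdx?]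
    have hfirst : stepA ([], 0, decide (h > 0)) h = ([], h, decide (h > 0)) := by
      simp [stepA]
    simp only [simplify_list, h0, List.foldl, hfirst]
    rw [loop_runs t [] h (decide (h > 0))]
    rw [simplify_list_alt]
    simp
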